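-- pv_equiv track=rewrite | github.com/egementunca/identity-factory-api | identity_factory/circuits/formats.py | char_to_wire
-- ===== SOURCE A (Python) =====
-- from typing import List, Tuple, Optional, Dict, Any, Union
--
-- def char_to_wire(c: str) -> Tuple[int, int]:
--     """Convert character(s) to wire index. Returns (wire, chars_consumed)."""
--     if c[0] == '~':
--         inner, consumed = char_to_wire(c[1:])
--         return (inner + 83, consumed + 1)
--
--     if '0' <= c[0] <= '9':
--         return (ord(c[0]) - ord('0'), 1)
--     elif 'a' <= c[0] <= 'z':
--         return (ord(c[0]) - ord('a') + 10, 1)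
--     elif 'A' <= c[0] <= 'Z':
--         return (ord(c[0]) - ord('A') + 36, 1)
--     else:
--         special = "!@#$%^&*()-_=+[]{}<>?"
--         idx = special.find(c[0])
--         if idx >= 0:
--             return (62 + idx, 1)
--         raise ValueError(f"Invalid wire character: {c[0]}")
-- ===== SOURCE B (Python) =====
-- def char_to_wire(c):
--     """Convert character(s) to wire index. Returns (wire, chars_consumed)."""
--     n = 0
--     while c[n] == '~':
--         n += 1
--     ch = c[n]
--     if '0' <= ch <= '9':
--         base = ord(ch) - ord('0')
--     elif 'a' <= ch <= 'z':
--         base = ord(ch) - ord('a') + 10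
--     elif 'A' <= ch <= 'Z':
--         base = ord(ch) - ord('A') + 36
--     else:
--         idx = "!@#$%^&*()-_=+[]{}<>?".find(ch)
--         if idx < 0:
--             raise ValueError(f"Invalid wire character: {ch}")
--         base = 62 + idx
--     return (base + 83 * n, 1 + n)
-- ===== Notes on version B (the rewrite author's own statement) =====
-- stated objective: idiomatic
-- what changed: Replaces the recursion (one call per leading '~', rebuilding the pair at each level) with an iterative count of leading '~' characters followed by a single classification of the base character and a closed-form combination (base + 83*n, 1 + n).
import Mathlib
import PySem

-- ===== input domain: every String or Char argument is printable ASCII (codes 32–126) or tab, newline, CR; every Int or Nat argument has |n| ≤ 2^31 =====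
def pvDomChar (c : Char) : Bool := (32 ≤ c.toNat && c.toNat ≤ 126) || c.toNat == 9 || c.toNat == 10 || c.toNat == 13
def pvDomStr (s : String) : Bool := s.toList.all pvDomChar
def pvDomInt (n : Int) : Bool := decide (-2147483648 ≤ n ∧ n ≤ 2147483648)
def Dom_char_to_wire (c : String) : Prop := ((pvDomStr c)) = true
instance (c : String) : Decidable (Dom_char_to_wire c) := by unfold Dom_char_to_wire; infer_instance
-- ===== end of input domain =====

-- B replaces A's recursion with an iterative count of leading '~' plus one base-character
-- classification (idiomatic; same O(n) cost, no recursion/slicing). A = B on Pre_ (inputs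
-- where A returns normally).


-- ===== PORT A =====
-- the special-character string of A; shared literal of both ports
def specialChars : List Char :=
  ['!','@','#','$','%','^','&','*','(',')','-','_','=','+','[',']','{','}','<','>','?']

-- hand port of str.find for a single character: index of first occurrence, -1 if absent
-- (exact: Python str.find on a 1-char needle)
def findSpecial : List Char → Char → Int
  | [], _ => -1
  | x :: xs, ch =>
    if x = ch then 0
    else
      let r := findSpecial xs ch
      if r < 0 then -1 else r + 1

-- A's recursion, step for step on the character list; [] (IndexError) and an
-- unrecognised base char (ValueError) are outside Pre_ and return a dummy (0, 0)
def charToWireA : List Char → Int × Int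
  | [] => (0, 0)
  | ch :: rest =>
    if ch = '~' then
      let p := charToWireA rest
      (p.1 + 83, p.2 + 1)
    else if '0' ≤ ch ∧ ch ≤ '9' then ((ch.toNat : Int) - 48, 1)
    else if 'a' ≤ ch ∧ ch ≤ 'z' then ((ch.toNat : Int) - 87, 1)
    else if 'A' ≤ ch ∧ ch ≤ 'Z' then ((ch.toNat : Int) - 29, 1)
    else
      let idx := findSpecial specialChars ch
      if idx ≥ 0 then (62 + idx, 1) else (0, 0)

def char_to_wire (c : String) : Int × Int := charToWireA c.toList

-- ===== PORT B =====
-- Source B's while loop: count the leading '~' characters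
def countTildes : List Char → Nat
  | '~' :: rest => countTildes rest + 1
  | _ => 0

-- Source B's base-character classification
def baseValB (ch : Char) : Int :=
  if '0' ≤ ch ∧ ch ≤ '9' then (ch.toNat : Int) - 48
  else if 'a' ≤ ch ∧ ch ≤ 'z' then (ch.toNat : Int) - 87
  else if 'A' ≤ ch ∧ ch ≤ 'Z' then (ch.toNat : Int) - 29
  else 62 + findSpecial specialChars ch   -- Pre_ guarantees find succeeds (idx ≥ 0)

def char_to_wire_alt (c : String) : Int × Int :=
  let l := c.toList
  let n := countTildes l
  let ch := l.getD n ' '    -- Source B raises IndexError when n = length; outside Pre_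
  (baseValB ch + 83 * (n : Int), 1 + (n : Int))

-- ===== PRECONDITION & SPEC =====
-- a character A's classification accepts
def validBase (ch : Char) : Bool :=
  (('0' ≤ ch && ch ≤ '9') || ('a' ≤ ch && ch ≤ 'z') || ('A' ≤ ch && ch ≤ 'Z')
    || specialChars.contains ch)

-- Pre_ excludes exactly the inputs where A raises: empty or all-'~' strings (IndexError)
-- and strings whose first non-'~' character is unrecognised (ValueError)
def Pre_char_to_wire (c : String) : Prop :=
  (c.toList.dropWhile (· == '~')) ≠ [] ∧
    validBase ((c.toList.dropWhile (· == '~')).headD ' ') = true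
instance (c : String) : Decidable (Pre_char_to_wire c) := by
  unfold Pre_char_to_wire; infer_instance

def pvWitness_char_to_wire : String := "~5"

def Spec_char_to_wire (c : String) (out : Int × Int) : Prop := out = char_to_wire_alt c
instance (c : String) (out : Int × Int) : Decidable (Spec_char_to_wire c out) := by
  unfold Spec_char_to_wire; infer_instance

-- ===== CLAIM (what is proved, stated in full; the proofs are below) =====
def Claim_equal_char_to_wire : Prop :=
  ∀ (c : String), Dom_char_to_wire c → Pre_char_to_wire c →
    Spec_char_to_wire c (char_to_wire c)

-- ===== LEMMAS AND PROOFS =====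
theorem findSpecial_of_mem (ch : Char) :
    ∀ (xs : List Char), ch ∈ xs → 0 ≤ findSpecial xs ch := by
  intro xs hm
  induction xs with
  | nil => cases hm
  | cons x xs ih =>
    simp only [findSpecial]
    by_cases hx : x = ch
    · simp [hx]
    · have : ch ∈ xs := by
        rcases List.mem_cons.mp hm with h | h
        · exact absurd h.symm hx
        · exact h
      have h0 := ih this
      simp [hx]
      omega

-- the core equivalence, on character lists
theorem main_lemma :
    ∀ (l : List Char),
      (l.dropWhile (· == '~')) ≠ [] →
      validBase ((l.dropWhile (· == '~')).headD ' ') = true →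
      charToWireA l =
        (baseValB (l.getD (countTildes l) ' ') + 83 * (countTildes l : Int),
          1 + (countTildes l : Int)) := by
  intro l
  induction l with
  | nil => intro h _; simp [List.dropWhile] at h
  | cons ch rest ih =>
    intro hne hv
    by_cases ht : ch = '~'
    · subst ht
      have hd : (('~' : Char) :: rest).dropWhile (· == '~') = rest.dropWhile (· == '~') := by
        simp [List.dropWhile]
      rw [hd] at hne hv
      have ihr := ih hne hv
      have hc : countTildes ('~' :: rest) = countTildes rest + 1 := by
        simp [countTildes]
      simp only [charToWireA, ihr, hc]
      have hg : (('~' : Char) :: rest).getD (countTildes rest + 1) ' ' =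
          rest.getD (countTildes rest) ' ' := by
        simp [List.getD]
      rw [hg]
      rw [Prod.mk.injEq]
      constructor <;> push_cast <;> ring
    · have hc : countTildes (ch :: rest) = 0 := by
        cases rest <;> simp_all [countTildes]
      have hbeq : (ch == '~') = false := by simp [ht]
      have hd : (ch :: rest).dropWhile (· == '~') = ch :: rest := by
        simp [List.dropWhile, hbeq]
      rw [hd] at hv
      simp only [List.headD] at hv
      have hg : (ch :: rest).getD 0 ' ' = ch := rfl
      rw [hc, hg]
      simp only [charToWireA, baseValB, if_neg ht]
      by_cases h1 : '0' ≤ ch ∧ ch ≤ '9'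
      · simp [h1]
      · by_cases h2 : 'a' ≤ ch ∧ ch ≤ 'z'
        · simp [h1, h2]
        · by_cases h3 : 'A' ≤ ch ∧ ch ≤ 'Z'
          · simp [h1, h2, h3]
          · have hmem : ch ∈ specialChars := by
              simp only [validBase] at hv
              have h1' : ¬ ('0' ≤ ch && ch ≤ '9') = true := by
                simpa [Bool.and_eq_true, decide_eq_true_iff] using h1
              have h2' : ¬ ('a' ≤ ch && ch ≤ 'z') = true := by
                simpa [Bool.and_eq_true, decide_eq_true_iff] using h2
              have h3' : ¬ ('A' ≤ ch && ch ≤ 'Z') = true := by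
                simpa [Bool.and_eq_true, decide_eq_true_iff] using h3
              simp [h1', h2', h3'] at hv
              exact hv
            have hfind := findSpecial_of_mem ch specialChars hmem
            simp [h1, h2, h3, hfind]

-- ===== VERDICT (by name: the statement is the Claim_ definition above) =====
theorem char_to_wire_spec : Claim_equal_char_to_wire := by
  intro c _ hpre
  obtain ⟨h1, h2⟩ := hpre
  unfold Spec_char_to_wire char_to_wire char_to_wire_alt
  exact main_lemma c.toList h1 h2
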